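-- pv_equiv track=rewrite | github.com/Aenariss/KRY-proj2 | utils.py | RSApadding
-- ===== SOURCE A (Python) =====
-- def RSApadding(hash, key_len):
--
--     binary_hash = format(hash, 'b')
--
--     binary_hash = list(binary_hash)
--
--     base_len = len(binary_hash)
--     # until I reach the designated length of the RSA key, add padding
--     # lets add 1 anmd then all 0 (same as md5 hash)
--
--     prepend = []
--
--     while base_len < key_len-3: # until I reach the RSA length-3 (cuz of the 0s that end the padding), add 1s
--         prepend.append('1')
--         base_len += 1
--
--     prepend.append('0')
--     prepend.append('0')
--
--     binary_hash = prepend + binary_hash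
--     binary_hash = ''.join(binary_hash)
--     return int(binary_hash, 2)
-- ===== SOURCE B (Python) =====
-- def RSApadding(hash, key_len):
--     # base_len matches len(format(hash, 'b')) for nonnegative hash (hash == 0 -> 1)
--     base_len = hash.bit_length() or 1
--     ones = max(0, key_len - 3 - base_len)
--     return hash + ((2 ** ones - 1) << (base_len + 2))
-- ===== Notes on version B (the rewrite author's own statement) =====
-- stated objective: simpler
-- what changed: Replaces the binary-string building, the per-bit while loop of '1' characters and the int(...,2) re-parse by one closed-form arithmetic expression on powers of two (bit_length, a shift and an add).
import Mathlib
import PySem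

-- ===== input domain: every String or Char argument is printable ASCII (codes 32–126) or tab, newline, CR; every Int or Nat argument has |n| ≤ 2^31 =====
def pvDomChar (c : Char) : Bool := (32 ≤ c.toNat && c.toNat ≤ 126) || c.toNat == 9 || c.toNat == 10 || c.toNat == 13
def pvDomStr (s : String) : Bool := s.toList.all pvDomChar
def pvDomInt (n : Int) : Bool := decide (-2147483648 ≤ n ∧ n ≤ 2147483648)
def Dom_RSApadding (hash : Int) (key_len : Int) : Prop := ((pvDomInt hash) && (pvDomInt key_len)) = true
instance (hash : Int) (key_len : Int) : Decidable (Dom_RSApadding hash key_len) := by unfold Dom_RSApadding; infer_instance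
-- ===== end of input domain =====

-- B replaces A's string building / while loop / int(...,2) re-parse by one closed-form
-- arithmetic expression on powers of two (objective: simpler).

-- ===== PORT A =====
-- format(hash, 'b') for nonnegative hash: most-significant-bit-first binary digits.
def pvBinGo : Nat → List Char
  | 0 => []
  | n + 1 => pvBinGo ((n + 1) / 2) ++ [if (n + 1) % 2 = 1 then '1' else '0']
decreasing_by exact Nat.div_lt_self (Nat.succ_pos n) one_lt_two

def pvBin (n : Nat) : List Char := if n = 0 then ['0'] else pvBinGo n

-- the while loop: append '1' while base_len < key_len - 3
def pvOnes (base_len key_len : Int) : List Char :=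
  if base_len < key_len - 3 then '1' :: pvOnes (base_len + 1) key_len else []
termination_by (key_len - 3 - base_len).toNat
decreasing_by omega

-- int(s, 2) on a string of '0'/'1' characters
def pvStep (a : Nat) (c : Char) : Nat := 2 * a + (if c = '1' then 1 else 0)
def pvParse (l : List Char) : Nat := l.foldl pvStep 0

def RSApadding (hash : Int) (key_len : Int) : Int :=
  let binary_hash := pvBin hash.toNat
  let base_len : Int := binary_hash.length
  let prepend := pvOnes base_len key_len ++ ['0', '0']
  (pvParse (prepend ++ binary_hash) : Int)

-- ===== PORT B =====
def RSApadding_alt (hash : Int) (key_len : Int) : Int :=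
  let base_len : Int := max 1 (hash.natAbs.size : Int)   -- hash.bit_length() or 1
  let ones := max 0 (key_len - 3 - base_len)
  hash + ((2 : Int) ^ ones.toNat - 1) * 2 ^ (base_len + 2).toNat

-- ===== PRECONDITION & SPEC =====
-- Pre_ excludes exactly the negative hashes, on which A raises ValueError ('-' inside the string fed to int(...,2)).
def Pre_RSApadding (hash : Int) (key_len : Int) : Prop := 0 ≤ hash
instance (hash : Int) (key_len : Int) : Decidable (Pre_RSApadding hash key_len) := by unfold Pre_RSApadding; infer_instance
def pvWitness_RSApadding : Int × Int := (5, 16)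

def Spec_RSApadding (hash : Int) (key_len : Int) (out : Int) : Prop := out = RSApadding_alt hash key_len
instance (hash : Int) (key_len : Int) (out : Int) : Decidable (Spec_RSApadding hash key_len out) := by unfold Spec_RSApadding; infer_instance

-- ===== CLAIM =====
def Claim_equal_RSApadding : Prop := ∀ (hash : Int) (key_len : Int), Dom_RSApadding hash key_len → Pre_RSApadding hash key_len → Spec_RSApadding hash key_len (RSApadding hash key_len)

-- ===== LEMMAS AND PROOFS =====
theorem pvFoldl_shift (l : List Char) (a : Nat) :
    l.foldl pvStep a = a * 2 ^ l.length + l.foldl pvStep 0 := by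
  induction l generalizing a with
  | nil => simp
  | cons c t ih =>
    simp only [List.foldl_cons, List.length_cons]
    rw [ih (pvStep a c), ih (pvStep 0 c), pvStep, pvStep]
    ring

theorem pvParse_append (l₁ l₂ : List Char) :
    pvParse (l₁ ++ l₂) = pvParse l₁ * 2 ^ l₂.length + pvParse l₂ := by
  unfold pvParse
  rw [List.foldl_append, pvFoldl_shift]

theorem pvParse_binGo (n : Nat) : pvParse (pvBinGo n) = n := by
  induction n using Nat.strong_induction_on with
  | _ n ih =>
    match n with
    | 0 => simp [pvBinGo, pvParse]
    | m + 1 =>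
      rw [pvBinGo, pvParse_append, ih ((m + 1) / 2) (Nat.div_lt_self (Nat.succ_pos m) one_lt_two)]
      by_cases h : (m + 1) % 2 = 1 <;> simp [pvParse, pvStep, h] <;> omega

theorem pvLength_binGo (n : Nat) : (pvBinGo n).length = n.size := by
  induction n using Nat.strong_induction_on with
  | _ n ih =>
    match n with
    | 0 => simp [pvBinGo, Nat.size_zero]
    | m + 1 =>
      rw [pvBinGo, List.length_append,
        ih ((m + 1) / 2) (Nat.div_lt_self (Nat.succ_pos m) one_lt_two)]
      have hs : Nat.size (m + 1) = Nat.size ((m + 1) / 2) + 1 := by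
        conv_lhs => rw [← Nat.bit_decide_mod_two_eq_one_shiftRight_one (m + 1)]
        rw [Nat.size_bit (by rw [Nat.bit_decide_mod_two_eq_one_shiftRight_one]; omega),
          Nat.shiftRight_one]
      rw [hs]; simp

theorem pvOnes_eq (b k : Int) : pvOnes b k = List.replicate (k - 3 - b).toNat '1' := by
  by_cases h : b < k - 3
  · rw [pvOnes, if_pos h, pvOnes_eq (b + 1) k]
    have h1 : (k - 3 - b).toNat = (k - 3 - (b + 1)).toNat + 1 := by omega
    rw [h1, List.replicate_succ]
  · rw [pvOnes, if_neg h]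
    have : (k - 3 - b).toNat = 0 := by omega
    rw [this, List.replicate_zero]
termination_by (k - 3 - b).toNat
decreasing_by omega

theorem pvParse_replicate (k : Nat) : pvParse (List.replicate k '1') = 2 ^ k - 1 := by
  induction k with
  | zero => simp [pvParse]
  | succ m ih =>
    rw [List.replicate_succ']
    rw [pvParse_append, ih]
    have h1 : (1 : Nat) ≤ 2 ^ m := Nat.one_le_two_pow
    simp [pvParse, pvStep]
    ring_nf
    omega

theorem pvLength_bin (n : Nat) : ((pvBin n).length : Int) = max 1 (n.size : Int) := by
  unfold pvBin
  by_cases h : n = 0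
  · simp [h]
  · rw [if_neg h, pvLength_binGo]
    have : 1 ≤ n.size := by
      rw [Nat.one_le_iff_ne_zero, Ne, Nat.size_eq_zero]; exact h
    omega

theorem pvParse_bin (n : Nat) : pvParse (pvBin n) = n := by
  unfold pvBin
  by_cases h : n = 0
  · simp [h, pvParse, pvStep]
  · rw [if_neg h, pvParse_binGo]

theorem RSApadding_spec : Claim_equal_RSApadding := by
  intro hash key_len _ hpre
  unfold Pre_RSApadding at hpre
  unfold Spec_RSApadding RSApadding RSApadding_alt
  simp only
  set n := hash.toNat with hn
  have habs : hash.natAbs = n := by omega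
  have hcast : (n : Int) = hash := by omega
  rw [habs]
  set L := pvBin n with hL
  have hlen : (L.length : Int) = max 1 (n.size : Int) := pvLength_bin n
  rw [← hlen]
  set o : Nat := (key_len - 3 - (L.length : Int)).toNat with ho
  have hmax : (max 0 (key_len - 3 - (L.length : Int))).toNat = o := by omega
  have hbl : ((L.length : Int) + 2).toNat = L.length + 2 := by omega
  rw [hmax, hbl]
  rw [List.append_assoc, pvParse_append, pvOnes_eq, pvParse_replicate, pvParse_append,
    pvParse_bin]
  have h00 : pvParse ['0', '0'] = 0 := by simp [pvParse, pvStep]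
  rw [h00, ← ho]
  simp only [List.length_append, List.length_cons, List.length_nil]
  have h2 : (1 : Nat) ≤ 2 ^ o := Nat.one_le_two_pow
  push_cast [Nat.cast_sub h2]
  rw [hcast]
  ring
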